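-- pv_equiv track=rewrite | github.com/sopify-ai/sopify | runtime/archive_lifecycle.py | _split_front_matter_entries
-- ===== SOURCE A (Python) =====
-- def _split_front_matter_entries(front_matter: str) -> list[list[str]]:
--     entries: list[list[str]] = []
--     current: list[str] = []
--     for line in front_matter.splitlines():
--         if current and line and not line.startswith(" "):
--             entries.append(current)
--             current = [line]
--             continue
--         current.append(line)
--     if current:
--         entries.append(current)
--     return entries
-- ===== SOURCE B (Python) =====
-- def _split_front_matter_entries(front_matter: str) -> list[list[str]]:
--     lines = front_matter.splitlines()
--     if not lines:
--         return []
--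
--     def is_boundary(line: str) -> bool:
--         return bool(line) and not line.startswith(" ")
--
--     def chop(first: str, rest: list[str]) -> list[list[str]]:
--         k = next((i for i, l in enumerate(rest) if is_boundary(l)), len(rest))
--         group = [first] + rest[:k]
--         if k == len(rest):
--             return [group]
--         return [group] + chop(rest[k], rest[k + 1:])
--
--     return chop(lines[0], lines[1:])
-- ===== Notes on version B (the rewrite author's own statement) =====
-- stated objective: alternative
-- what changed: Replaced the incremental accumulator loop (append each line to a current group, flush on boundary) with a recursive chop that locates the next boundary index and slices out a whole group at a time.
import Mathlib
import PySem

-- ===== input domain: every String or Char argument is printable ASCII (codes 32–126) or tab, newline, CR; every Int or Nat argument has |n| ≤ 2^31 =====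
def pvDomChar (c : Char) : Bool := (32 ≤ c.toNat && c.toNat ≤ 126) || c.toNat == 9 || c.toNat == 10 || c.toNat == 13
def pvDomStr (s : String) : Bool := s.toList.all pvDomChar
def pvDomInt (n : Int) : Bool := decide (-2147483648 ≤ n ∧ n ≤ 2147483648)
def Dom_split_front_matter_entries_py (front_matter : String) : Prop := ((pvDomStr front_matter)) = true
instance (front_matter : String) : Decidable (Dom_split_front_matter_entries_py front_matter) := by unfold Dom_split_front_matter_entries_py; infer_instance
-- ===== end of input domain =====

-- B replaces A's incremental accumulator loop by a recursive chop that finds the next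
-- boundary index and slices a whole group at a time (different decomposition, same cost).


-- ===== PORT A =====
def stepA (st : List (List String) × List String) (line : String) :
    List (List String) × List String :=
  if st.2 ≠ [] ∧ line ≠ "" ∧ ¬ (PySem.Str.startswith line " " = true) then
    (st.1 ++ [st.2], [line])
  else
    (st.1, st.2 ++ [line])

def split_front_matter_entries_py (front_matter : String) : List (List String) :=
  let st := (PySem.Str.splitlines front_matter).foldl stepA ([], [])
  if st.2 ≠ [] then st.1 ++ [st.2] else st.1

-- ===== PORT B =====
-- is_boundary in Source B
def isB (line : String) : Bool := line ≠ "" && !(PySem.Str.startswith line " ")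

-- chop in Source B: k = index of first boundary in rest (rest[:k] = takeWhile, rest[k:] = dropWhile)
def chop (first : String) (rest : List String) : List (List String) :=
  let group := first :: rest.takeWhile (fun l => !isB l)
  match h : rest.dropWhile (fun l => !isB l) with
  | [] => [group]
  | y :: r => group :: chop y r
termination_by rest.length
decreasing_by
  have hle : (rest.dropWhile (fun l => !isB l)).length ≤ rest.length :=
    List.length_dropWhile_le _ _
  rw [h] at hle
  simpa using Nat.lt_of_lt_of_le (Nat.lt_succ_self r.length) hle

def split_front_matter_entries_py_alt (front_matter : String) : List (List String) :=
  match PySem.Str.splitlines front_matter with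
  | [] => []
  | x :: xs => chop x xs

-- ===== PRECONDITION & SPEC =====
def Spec_split_front_matter_entries_py (front_matter : String) (out : List (List String)) : Prop := out = split_front_matter_entries_py_alt front_matter
instance (front_matter : String) (out : List (List String)) : Decidable (Spec_split_front_matter_entries_py front_matter out) := by unfold Spec_split_front_matter_entries_py; infer_instance

-- ===== CLAIM (what is proved, stated in full; the proofs are below) =====
def Claim_equal_split_front_matter_entries_py : Prop := ∀ (front_matter : String), Dom_split_front_matter_entries_py front_matter → Spec_split_front_matter_entries_py front_matter (split_front_matter_entries_py front_matter)

-- ===== LEMMAS AND PROOFS =====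

-- common recursive grouping both ports reduce to
def G (cur : List String) : List String → List (List String)
  | [] => [cur]
  | x :: xs => if isB x then cur :: G [x] xs else G (cur ++ [x]) xs

theorem foldl_stepA_G : ∀ (xs : List String) (es : List (List String)) (cur : List String),
    cur ≠ [] →
    (List.foldl stepA (es, cur) xs).2 ≠ [] ∧
    (List.foldl stepA (es, cur) xs).1 ++ [(List.foldl stepA (es, cur) xs).2] = es ++ G cur xs := by
  intro xs
  induction xs with
  | nil => intro es cur h; simp [G, h]
  | cons x xs ih =>
    intro es cur h
    rw [List.foldl_cons]
    by_cases he : x = ""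
    · have hb : isB x = false := by simp [isB, he]
      have hst : stepA (es, cur) x = (es, cur ++ [x]) := by simp [stepA, he]
      rw [hst]
      simpa [G, hb] using ih es (cur ++ [x]) (by simp)
    · by_cases hs : PySem.Chars.startswith x.toList [' '] = true
      · have hb : isB x = false := by simp [isB, hs]
        have hst : stepA (es, cur) x = (es, cur ++ [x]) := by simp [stepA, hs]
        rw [hst]
        simpa [G, hb] using ih es (cur ++ [x]) (by simp)
      · have hb : isB x = true := by simp [isB, he, hs]
        have hst : stepA (es, cur) x = (es ++ [cur], [x]) := by
          simp [stepA, h, he, hs]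
        rw [hst]
        simpa [G, hb] using ih (es ++ [cur]) [x] (by simp)

theorem G_unfold : ∀ (xs cur : List String),
    G cur xs =
      match xs.dropWhile (fun l => !isB l) with
      | [] => [cur ++ xs.takeWhile (fun l => !isB l)]
      | y :: r => (cur ++ xs.takeWhile (fun l => !isB l)) :: G [y] r := by
  intro xs
  induction xs with
  | nil => intro cur; simp [G]
  | cons x xs ih =>
    intro cur
    by_cases hb : isB x = true
    · simp [G, hb, List.dropWhile, List.takeWhile]
    · have hb' : isB x = false := by simpa using hb
      have := ih (cur ++ [x])
      simp only [G, hb']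
      rw [if_neg (by simp)]
      rw [this]
      simp only [List.dropWhile, List.takeWhile, hb', Bool.not_false]
      cases h : xs.dropWhile (fun l => !isB l) <;> simp

theorem chop_eq_G : ∀ (n : ℕ) (xs : List String), xs.length ≤ n → ∀ x, chop x xs = G [x] xs := by
  intro n
  induction n with
  | zero =>
    intro xs hx x
    have : xs = [] := List.eq_nil_of_length_eq_zero (Nat.le_zero.mp hx)
    subst this
    simp [chop, G]
  | succ n ih =>
    intro xs hx x
    rw [G_unfold]
    rw [chop]
    cases h : xs.dropWhile (fun l => !isB l) with
    | nil => simp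
    | cons y r =>
      have hle : (xs.dropWhile (fun l => !isB l)).length ≤ xs.length :=
        List.length_dropWhile_le _ _
      rw [h] at hle
      have hr : r.length ≤ n := by
        simp at hle
        omega
      simp [ih r hr y]

theorem split_front_matter_entries_py_spec : Claim_equal_split_front_matter_entries_py := by
  intro fm _
  unfold Spec_split_front_matter_entries_py
  unfold split_front_matter_entries_py split_front_matter_entries_py_alt
  cases h : PySem.Str.splitlines fm with
  | nil => simp
  | cons x xs =>
    have hstep : List.foldl stepA ([], []) (x :: xs) = List.foldl stepA ([], [x]) xs := by
      simp [List.foldl, stepA]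
    obtain ⟨hne, heq⟩ := foldl_stepA_G xs [] [x] (by simp)
    rw [hstep, if_pos hne, heq]
    simpa using (chop_eq_G xs.length xs le_rfl x).symm
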